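-- pv_equiv track=rewrite | github.com/DemocraciaEnRed/webcausascomunes | app/directus.py | _parse_ubicacion
-- ===== SOURCE A (Python) =====
-- def _parse_ubicacion(row_ubicacion):
--     ubicacion_arr = []
--
--     ubics = row_ubicacion.split('-')
--     for ubic in ubics:
--         ubic_parsed = ubic.strip().lower()
--         if ubic_parsed.isalnum():
--             ubicacion_arr.append(ubic_parsed)
--         else:
--             return
--
--     return ubicacion_arr
-- ===== SOURCE B (Python) =====
-- def _parse_ubicacion(row_ubicacion):
--     # Recursive decomposition: peel off the segment before the first '-' and
--     # recurse on the remainder; no split() pass at all.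
--     i = row_ubicacion.find('-')
--     if i == -1:
--         p = row_ubicacion.strip().lower()
--         return [p] if p.isalnum() else None
--     head = row_ubicacion[:i].strip().lower()
--     if not head.isalnum():
--         return None
--     rest = _parse_ubicacion(row_ubicacion[i + 1:])
--     return None if rest is None else [head] + rest
-- ===== Notes on version B (the rewrite author's own statement) =====
-- stated objective: alternative
-- what changed: Replaces A's split-then-loop-with-early-return by a recursive decomposition: find the first dash, validate the segment before it, and recurse on the remainder via slicing, never calling split.
import Mathlib
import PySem

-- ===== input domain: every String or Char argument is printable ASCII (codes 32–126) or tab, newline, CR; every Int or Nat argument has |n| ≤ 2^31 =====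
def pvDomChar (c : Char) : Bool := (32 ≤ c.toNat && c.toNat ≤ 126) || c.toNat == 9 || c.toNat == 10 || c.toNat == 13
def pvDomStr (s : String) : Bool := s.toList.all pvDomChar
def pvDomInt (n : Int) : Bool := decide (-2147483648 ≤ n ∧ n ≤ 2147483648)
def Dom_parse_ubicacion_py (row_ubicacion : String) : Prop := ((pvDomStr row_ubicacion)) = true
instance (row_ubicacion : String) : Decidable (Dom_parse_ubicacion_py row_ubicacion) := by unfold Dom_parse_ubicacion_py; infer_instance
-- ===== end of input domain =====

-- B replaces A's split-then-loop by a recursive decomposition on the first '-' (find + slices, no split call); alternative, same cost.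

-- ===== PORT A =====
-- A's loop over row_ubicacion.split('-'): accumulate parsed pieces, bail out with None on the first non-alphanumeric piece.
def parseUloop : List String → List String → Option (List String)
  | [], acc => some acc
  | u :: rest, acc =>
    let p := PySem.Str.lower (PySem.Str.strip u)
    if PySem.Str.strIsalnum p then parseUloop rest (acc ++ [p]) else none

def parse_ubicacion_py (row_ubicacion : String) : Option (List String) :=
  parseUloop ((PySem.Str.split? row_ubicacion "-").getD []) []

-- ===== PORT B =====
-- Source B's recursion, on the string's characters (a Python str = its list of code points).
-- The slices s[:i] and s[i+1:] with 0 ≤ i are exactly List.take/List.drop (PySem.List.slice_to/slice_from).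
def parse_ubicacion_py_altGo (cs : List Char) : Option (List String) :=
  let i := PySem.Chars.find cs ['-']
  if hi : i = -1 then
    let p := PySem.Chars.lower (PySem.Chars.strip cs)
    if PySem.Chars.strIsalnum p then some [String.ofList p] else none
  else
    let head := PySem.Chars.lower (PySem.Chars.strip (cs.take i.toNat))
    if PySem.Chars.strIsalnum head then
      match parse_ubicacion_py_altGo (cs.drop (i.toNat + 1)) with
      | some rest => some (String.ofList head :: rest)
      | none => none
    else none
termination_by cs.length
decreasing_by
  have h1 : ['-'] <:+: cs := (PySem.Chars.find_ne_neg_one_iff cs ['-']).mp hi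
  have h2 := h1.length_le
  simp only [List.length_cons, List.length_nil, List.length_drop] at *
  omega

def parse_ubicacion_py_alt (row_ubicacion : String) : Option (List String) :=
  parse_ubicacion_py_altGo row_ubicacion.toList

-- ===== PRECONDITION & SPEC =====
def Spec_parse_ubicacion_py (row_ubicacion : String) (out : Option (List String)) : Prop := out = parse_ubicacion_py_alt row_ubicacion
instance (row_ubicacion : String) (out : Option (List String)) : Decidable (Spec_parse_ubicacion_py row_ubicacion out) := by unfold Spec_parse_ubicacion_py; infer_instance

-- ===== CLAIM (what is proved, stated in full; the proofs are below) =====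
def Claim_equal_parse_ubicacion_py : Prop := ∀ (row_ubicacion : String), Dom_parse_ubicacion_py row_ubicacion → Spec_parse_ubicacion_py row_ubicacion (parse_ubicacion_py row_ubicacion)

-- ===== LEMMAS AND PROOFS =====

-- Pure cons-recursive form of splitting on '-'.
def sSplit : List Char → List (List Char)
  | [] => [[]]
  | c :: rest => if c = '-' then [] :: sSplit rest else (sSplit rest).modifyHead (c :: ·)

theorem sSplit_ne_nil (cs : List Char) : sSplit cs ≠ [] := by
  induction cs with
  | nil => simp [sSplit]
  | cons c rest ih =>
    by_cases h : c = '-'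
    · simp [sSplit, h]
    · cases hE : sSplit rest with
      | nil => exact absurd hE ih
      | cons a t => simp [sSplit, h, hE]

theorem splitOn_go_inv (fuel : Nat) :
    ∀ (l cur : List Char) (accs : List (List Char)), l.length ≤ fuel →
      PySem.Chars.splitOn.go ['-'] fuel l cur accs =
        accs.reverse ++ (sSplit l).modifyHead (cur.reverse ++ ·) := by
  induction fuel with
  | zero =>
    intro l cur accs hl
    have hln : l = [] := by cases l with | nil => rfl | cons a t => simp at hl
    subst hln
    simp [PySem.Chars.splitOn.go, sSplit]
  | succ fuel ih =>
    intro l cur accs hl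
    cases l with
    | nil => simp [PySem.Chars.splitOn.go, sSplit]
    | cons c rest =>
      by_cases hc : c = '-'
      · subst hc
        have hpre : List.isPrefixOf ['-'] ('-' :: rest) = true := by simp [List.isPrefixOf]
        rw [PySem.Chars.splitOn.go]
        simp only [hpre, if_true, List.length_cons, List.drop_succ_cons, List.length_nil, List.drop_zero]
        rw [ih rest [] _ (by simpa using Nat.le_of_succ_le_succ (by simpa using hl))]
        simp [sSplit]
        cases sSplit rest <;> simp
      · have hpre : List.isPrefixOf ['-'] (c :: rest) = false := by
          simp [List.isPrefixOf, Ne.symm hc]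
        rw [PySem.Chars.splitOn.go]
        simp only [hpre, Bool.false_eq_true, if_false]
        rw [ih rest (c :: cur) accs (by simpa using Nat.le_of_succ_le_succ (by simpa using hl))]
        cases hE : sSplit rest with
        | nil => exact absurd hE (sSplit_ne_nil rest)
        | cons a t => simp [sSplit, hc, hE]

theorem splitOn_eq_sSplit (cs : List Char) :
    PySem.Chars.splitOn cs ['-'] = sSplit cs := by
  unfold PySem.Chars.splitOn
  rw [splitOn_go_inv (cs.length + 1) cs [] [] (by omega)]
  cases hE : sSplit cs with
  | nil => exact absurd hE (sSplit_ne_nil cs)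
  | cons a t => simp

theorem sSplit_at_dash : ∀ (n : Nat) (cs : List Char), n < cs.length → cs[n]? = some '-' →
    (∀ j, j < n → cs[j]? ≠ some '-') →
    sSplit cs = cs.take n :: sSplit (cs.drop (n + 1)) := by
  intro n
  induction n with
  | zero =>
    intro cs hlen h0 _
    cases cs with
    | nil => simp at hlen
    | cons c rest =>
      simp at h0
      simp [sSplit, h0]
  | succ n ih =>
    intro cs hlen hn hmin
    cases cs with
    | nil => simp at hlen
    | cons c rest =>
      have hc : c ≠ '-' := by
        have := hmin 0 (by omega)
        simpa using this
      have hrest := ih rest (by simpa using Nat.lt_of_succ_lt_succ (by simpa using hlen))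
        (by simpa using hn)
        (by intro j hj; have := hmin (j+1) (by omega); simpa using this)
      simp [sSplit, hc, hrest]

theorem sSplit_no_dash {cs : List Char} (h : '-' ∉ cs) : sSplit cs = [cs] := by
  induction cs with
  | nil => rfl
  | cons c rest ih =>
    simp only [List.mem_cons, not_or] at h
    simp [sSplit, Ne.symm h.1, ih h.2]

theorem singleton_prefix_head {l : List Char} {a : Char} (h : [a] <+: l) : l.head? = some a := by
  rcases h with ⟨t, rfl⟩; rfl

-- B's recursion in closed form over sSplit (strong induction on the length).
theorem altGo_eq_aux : ∀ (N : Nat) (cs : List Char), cs.length ≤ N →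
    parse_ubicacion_py_altGo cs =
      if ((sSplit cs).map (fun p => PySem.Chars.lower (PySem.Chars.strip p))).all PySem.Chars.strIsalnum
      then some (((sSplit cs).map (fun p => PySem.Chars.lower (PySem.Chars.strip p))).map String.ofList)
      else none := by
  intro N
  induction N with
  | zero =>
    intro cs h
    have : cs = [] := by cases cs with | nil => rfl | cons a t => simp at h
    subst this
    rw [parse_ubicacion_py_altGo]
    decide
  | succ N ih =>
    intro cs h
    rw [parse_ubicacion_py_altGo]
    by_cases hi : PySem.Chars.find cs ['-'] = -1
    · have hnem : '-' ∉ cs := by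
        intro hm
        obtain ⟨s, t, rfl⟩ := List.append_of_mem hm
        exact (PySem.Chars.find_ne_neg_one_iff _ ['-']).mpr ⟨s, t, by simp⟩ hi
      rw [sSplit_no_dash hnem]
      by_cases hv : PySem.Chars.strIsalnum (PySem.Chars.lower (PySem.Chars.strip cs)) = true <;>
        simp [hi, hv]
    · have h0 : (0 : Int) ≤ PySem.Chars.find cs ['-'] := by
        have := PySem.Chars.neg_one_le_find cs ['-']
        omega
      obtain ⟨hpre, hmin⟩ := PySem.Chars.find_spec h0
      have hget : cs[(PySem.Chars.find cs ['-']).toNat]? = some '-' := by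
        have := singleton_prefix_head hpre
        rwa [List.head?_drop] at this
      have hlt : (PySem.Chars.find cs ['-']).toNat < cs.length := by
        by_contra hc
        rw [List.getElem?_eq_none_iff.mpr (by omega)] at hget
        simp at hget
      have hminget : ∀ j, j < (PySem.Chars.find cs ['-']).toNat → cs[j]? ≠ some '-' := by
        intro j hj hEq
        apply hmin j hj
        have hhd : (cs.drop j).head? = some '-' := by rw [List.head?_drop]; exact hEq
        cases hD : cs.drop j with
        | nil => rw [hD] at hhd; simp at hhd
        | cons a t =>
          rw [hD] at hhd
          simp at hhd
          subst hhd
          exact ⟨t, rfl⟩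
      rw [sSplit_at_dash _ cs hlt hget hminget]
      rw [ih (cs.drop ((PySem.Chars.find cs ['-']).toNat + 1)) (by simp; omega)]
      by_cases hhead : PySem.Chars.strIsalnum (PySem.Chars.lower (PySem.Chars.strip (cs.take (PySem.Chars.find cs ['-']).toNat))) = true <;>
        by_cases hrest : (((sSplit (cs.drop ((PySem.Chars.find cs ['-']).toNat + 1))).map (fun p => PySem.Chars.lower (PySem.Chars.strip p))).all PySem.Chars.strIsalnum) = true <;>
        simp [hi, hhead, hrest]

theorem altGo_eq (cs : List Char) :
    parse_ubicacion_py_altGo cs =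
      if ((sSplit cs).map (fun p => PySem.Chars.lower (PySem.Chars.strip p))).all PySem.Chars.strIsalnum
      then some (((sSplit cs).map (fun p => PySem.Chars.lower (PySem.Chars.strip p))).map String.ofList)
      else none :=
  altGo_eq_aux cs.length cs (Nat.le_refl _)

-- A's loop in closed form.
theorem parseUloop_eq (l : List String) (acc : List String) :
    parseUloop l acc =
      if (l.map (fun u => PySem.Str.lower (PySem.Str.strip u))).all PySem.Str.strIsalnum
      then some (acc ++ l.map (fun u => PySem.Str.lower (PySem.Str.strip u))) else none := by
  induction l generalizing acc with
  | nil => simp [parseUloop]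
  | cons u rest ih =>
    simp only [parseUloop, List.map_cons, List.all_cons]
    rw [ih]
    by_cases h : PySem.Chars.strIsalnum (PySem.Chars.lower (PySem.Chars.strip u.toList)) = true <;>
      simp [PySem.Str.strIsalnum, PySem.Str.lower, PySem.Str.strip, h]

-- ===== VERDICT (by name: the statement is the Claim_ definition above) =====
theorem parse_ubicacion_py_spec : Claim_equal_parse_ubicacion_py := by
  intro s _
  unfold Spec_parse_ubicacion_py parse_ubicacion_py parse_ubicacion_py_alt
  rw [parseUloop_eq]
  have hsplit : (PySem.Str.split? s "-").getD [] = (sSplit s.toList).map String.ofList := by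
    simp [PySem.Str.split?, PySem.Chars.split?, splitOn_eq_sSplit]
  rw [hsplit, altGo_eq]
  simp [List.map_map, Function.comp, PySem.Str.lower, PySem.Str.strip, PySem.Str.strIsalnum]
  split_ifs with h
  · simp
  · rfl
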